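-- pv_equiv track=rewrite | github.com/pwmcclung/practProbs | sum_digs.py | sum_dig_nth_term
-- ===== SOURCE A (Python) =====
-- def sum_dig_nth_term(init_val, pattern_l, nth_term):
--     term = init_val
--     for i in range(1, nth_term):
--         term += pattern_l[(i - 1) % len(pattern_l)]
--
--     sum_digits = 0
--     for digit in str(term):
--         sum_digits += int(digit)
--
--     return sum_digits
-- ===== SOURCE B (Python) =====
-- def sum_dig_nth_term(init_val, pattern_l, nth_term):
--     steps = nth_term - 1
--     term = init_val
--     if steps > 0:
--         q, r = divmod(steps, len(pattern_l))
--         term += q * sum(pattern_l) + sum(pattern_l[:r])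
--     s = 0
--     while term > 0:
--         s += term % 10
--         term //= 10
--     return s
-- ===== Notes on version B (the rewrite author's own statement) =====
-- stated objective: alternative
-- what changed: replaces A's O(nth_term) per-term accumulation loop with a single divmod closed form over the pattern cycle, and sums the digits arithmetically with repeated %10 // 10 instead of converting the term to a string
import Mathlib
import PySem

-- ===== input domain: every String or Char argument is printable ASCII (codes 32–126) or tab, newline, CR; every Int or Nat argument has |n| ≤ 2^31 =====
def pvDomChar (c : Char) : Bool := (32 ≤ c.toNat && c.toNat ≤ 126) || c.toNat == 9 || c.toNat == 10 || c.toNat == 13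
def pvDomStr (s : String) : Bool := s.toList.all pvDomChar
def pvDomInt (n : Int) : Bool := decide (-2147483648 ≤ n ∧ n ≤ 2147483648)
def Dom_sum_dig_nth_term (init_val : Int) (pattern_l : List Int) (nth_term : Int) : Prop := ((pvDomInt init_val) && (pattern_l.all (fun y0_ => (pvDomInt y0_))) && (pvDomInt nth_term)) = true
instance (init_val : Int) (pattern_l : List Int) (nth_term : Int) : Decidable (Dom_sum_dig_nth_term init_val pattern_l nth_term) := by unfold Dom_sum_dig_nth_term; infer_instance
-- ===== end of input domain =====

-- B replaces A's per-term accumulation loop with one closed-form divmod over the pattern cycle and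
-- sums the digits arithmetically (%10, //10) instead of through str(term).

-- ===== PORT A =====
-- pattern_l[(i-1) % len(pattern_l)]: for nonempty pattern_l the index 0 ≤ (i-1)%len < len is
-- always in range, so pyGetD with default 0 is exact there; len = 0 (ZeroDivisionError in Python)
-- is excluded by Pre_. int(digit) is exact via ofChars? on a one-char string; it is only applied
-- under Pre_'s 0 ≤ term, where every character of str(term) is a digit (no '-': ValueError in Python).
def sum_dig_nth_term (init_val : Int) (pattern_l : List Int) (nth_term : Int) : Int :=
  let term := (PySem.List.pyRange 1 nth_term 1).foldl
    (fun t i => t + PySem.List.pyGetD pattern_l (PySem.Int.mod (i - 1) (pattern_l.length : Int)) 0) init_val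
  (PySem.Int.toChars term).foldl (fun s d => s + (PySem.Int.ofChars? [d]).getD 0) 0

-- ===== PORT B =====
-- B's 'while term > 0: s += term % 10; term //= 10' transliterated over term.toNat: exact, since
-- for term > 0 Python's term % 10 and term // 10 coincide with Nat % and /, and a nonpositive
-- term never enters the loop (the port then returns s = 0 just like the Python loop).
def pvDigitLoop (n : Nat) (s : Int) : Int :=
  if n = 0 then s else pvDigitLoop (n / 10) (s + ((n % 10 : Nat) : Int))
decreasing_by exact Nat.div_lt_self (Nat.pos_of_ne_zero (by assumption)) (by norm_num)

def sum_dig_nth_term_alt (init_val : Int) (pattern_l : List Int) (nth_term : Int) : Int :=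
  let steps := nth_term - 1
  let term :=
    if 0 < steps then
      init_val + PySem.Int.floordiv steps (pattern_l.length : Int) * pattern_l.sum
        + (PySem.List.slice pattern_l none (some (PySem.Int.mod steps (pattern_l.length : Int)))).sum
    else init_val
  if 0 < term then pvDigitLoop term.toNat 0 else 0

-- ===== PRECONDITION & SPEC =====
-- closed-form value of the final term, used only by Pre_
def pvTerm_sum_dig_nth_term (init_val : Int) (pattern_l : List Int) (nth_term : Int) : Int :=
  if 1 < nth_term ∧ pattern_l ≠ [] then
    init_val + PySem.Int.floordiv (nth_term - 1) (pattern_l.length : Int) * pattern_l.sum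
      + (pattern_l.take (PySem.Int.mod (nth_term - 1) (pattern_l.length : Int)).toNat).sum
  else init_val

-- Pre_ excludes exactly the inputs where the Python A raises: ZeroDivisionError when the pattern
-- is empty but the loop runs (nth_term ≥ 2), and ValueError from int('-') when the final term is
-- negative.
def Pre_sum_dig_nth_term (init_val : Int) (pattern_l : List Int) (nth_term : Int) : Prop :=
  (nth_term ≤ 1 ∨ pattern_l ≠ []) ∧ 0 ≤ pvTerm_sum_dig_nth_term init_val pattern_l nth_term
instance (init_val : Int) (pattern_l : List Int) (nth_term : Int) : Decidable (Pre_sum_dig_nth_term init_val pattern_l nth_term) := by unfold Pre_sum_dig_nth_term; infer_instance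

def pvWitness_sum_dig_nth_term : Int × List Int × Int := (49, [3, 5], 7)

def Spec_sum_dig_nth_term (init_val : Int) (pattern_l : List Int) (nth_term : Int) (out : Int) : Prop := out = sum_dig_nth_term_alt init_val pattern_l nth_term
instance (init_val : Int) (pattern_l : List Int) (nth_term : Int) (out : Int) : Decidable (Spec_sum_dig_nth_term init_val pattern_l nth_term out) := by unfold Spec_sum_dig_nth_term; infer_instance

-- ===== CLAIM (what is proved, stated in full; the proofs are below) =====
def Claim_equal_sum_dig_nth_term : Prop := ∀ (init_val : Int) (pattern_l : List Int) (nth_term : Int), Dom_sum_dig_nth_term init_val pattern_l nth_term → Pre_sum_dig_nth_term init_val pattern_l nth_term → Spec_sum_dig_nth_term init_val pattern_l nth_term (sum_dig_nth_term init_val pattern_l nth_term)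

-- ===== LEMMAS AND PROOFS =====

-- A's accumulation loop over k steps equals the closed form: (k / m) full pattern sums plus the
-- sum of the first k % m pattern elements.
theorem pv_cycle_fold (pattern_l : List Int) (hne : pattern_l ≠ []) :
    ∀ (k : Nat) (init : Int),
      (PySem.List.pyRange 1 (1 + (k : Int)) 1).foldl
        (fun t i => t + PySem.List.pyGetD pattern_l (PySem.Int.mod (i - 1) (pattern_l.length : Int)) 0) init
      = init + ((k / pattern_l.length : Nat) : Int) * pattern_l.sum
          + (pattern_l.take (k % pattern_l.length)).sum := by
  have hm : 0 < pattern_l.length := List.length_pos_iff.mpr hne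
  intro k
  induction k with
  | zero =>
    intro init
    rw [PySem.List.pyRange_one_eq_nil (by norm_num)]
    simp
  | succ k ih =>
    intro init
    have hbd : (1 : Int) + ((k + 1 : Nat) : Int) = (1 + (k : Int)) + 1 := by push_cast; ring
    rw [hbd, PySem.List.pyRange_one_succ_right (by omega : (1 : Int) ≤ 1 + (k : Int)),
        List.foldl_append, ih]
    simp only [List.foldl_cons, List.foldl_nil]
    obtain ⟨q, r, hqr, hrlt⟩ : ∃ q r, k = pattern_l.length * q + r ∧ r < pattern_l.length :=
      ⟨k / pattern_l.length, k % pattern_l.length,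
        (Nat.div_add_mod k pattern_l.length).symm, Nat.mod_lt _ hm⟩
    subst hqr
    have hdiv0 : (pattern_l.length * q + r) / pattern_l.length = q := by
      rw [Nat.mul_add_div hm, Nat.div_eq_of_lt hrlt, Nat.add_zero]
    have hmod0 : (pattern_l.length * q + r) % pattern_l.length = r := by
      rw [Nat.mul_add_mod, Nat.mod_eq_of_lt hrlt]
    have hidx : PySem.Int.mod ((1 : Int) + ((pattern_l.length * q + r : Nat) : Int) - 1)
        (pattern_l.length : Int) = ((r : Nat) : Int) := by
      have h' : (1 : Int) + ((pattern_l.length * q + r : Nat) : Int) - 1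
          = ((pattern_l.length * q + r : Nat) : Int) := by push_cast; ring
      rw [h', PySem.Int.mod_natCast, hmod0]
    rw [hidx, PySem.List.pyGetD_natCast, List.getD_eq_getElem _ _ hrlt, hdiv0, hmod0]
    by_cases hlast : r + 1 = pattern_l.length
    · have e : pattern_l.length * q + r + 1 = (q + 1) * pattern_l.length := by
        rw [Nat.add_assoc, hlast]; ring
      have hdiv : (pattern_l.length * q + r + 1) / pattern_l.length = q + 1 := by
        rw [e, Nat.mul_div_cancel _ hm]
      have hmod : (pattern_l.length * q + r + 1) % pattern_l.length = 0 := by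
        rw [e, Nat.mul_mod_left]
      have hsum : (pattern_l.take r).sum + pattern_l[r] = pattern_l.sum := by
        rw [← List.sum_take_succ pattern_l r hrlt, hlast, List.take_length]
      rw [hdiv, hmod]
      simp only [List.take_zero, List.sum_nil]
      push_cast
      linarith [hsum]
    · have h1 : r + 1 < pattern_l.length := by omega
      have e : pattern_l.length * q + r + 1 = pattern_l.length * q + (r + 1) :=
        Nat.add_assoc _ _ _
      have hdiv : (pattern_l.length * q + r + 1) / pattern_l.length = q := by
        rw [e, Nat.mul_add_div hm, Nat.div_eq_of_lt h1, Nat.add_zero]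
      have hmod : (pattern_l.length * q + r + 1) % pattern_l.length = r + 1 := by
        rw [e, Nat.mul_add_mod, Nat.mod_eq_of_lt h1]
      rw [hdiv, hmod, List.sum_take_succ pattern_l r hrlt]
      ring

-- the two ports compute the same final term under Pre_'s nonemptiness condition
theorem pv_term_eq (init_val : Int) (pattern_l : List Int) (nth_term : Int)
    (h : nth_term ≤ 1 ∨ pattern_l ≠ []) :
    (PySem.List.pyRange 1 nth_term 1).foldl
      (fun t i => t + PySem.List.pyGetD pattern_l (PySem.Int.mod (i - 1) (pattern_l.length : Int)) 0) init_val
    = (if 0 < nth_term - 1 then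
        init_val + PySem.Int.floordiv (nth_term - 1) (pattern_l.length : Int) * pattern_l.sum
          + (PySem.List.slice pattern_l none (some (PySem.Int.mod (nth_term - 1) (pattern_l.length : Int)))).sum
      else init_val) := by
  by_cases hle : nth_term ≤ 1
  · rw [PySem.List.pyRange_one_eq_nil hle]
    simp only [List.foldl_nil]
    rw [if_neg (by omega)]
  · have hne : pattern_l ≠ [] := h.resolve_left hle
    set k : Nat := (nth_term - 1).toNat with hkdef
    have hk : nth_term = 1 + (k : Int) := by omega
    rw [hk, if_pos (by omega)]
    have hs : (1 : Int) + (k : Int) - 1 = ((k : Nat) : Int) := by ring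
    rw [hs, PySem.Int.floordiv_natCast, PySem.Int.mod_natCast, PySem.List.slice_to_natCast]
    exact pv_cycle_fold pattern_l hne k init_val

-- the one-character int() of a digit character is its value
theorem pv_digit_val (r : Nat) (hr : r < 10) :
    (PySem.Int.ofChars? [Nat.digitChar r]).getD 0 = (r : Int) := by
  interval_cases r <;> decide

-- pvDigitLoop's accumulator splits off additively
theorem pvDigitLoop_acc (n : Nat) : ∀ s : Int, pvDigitLoop n s = s + pvDigitLoop n 0 := by
  induction n using Nat.strong_induction_on with
  | _ n ih =>
    intro s
    by_cases h : n = 0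
    · subst h; simp [pvDigitLoop]
    · have hlt : n / 10 < n := Nat.div_lt_self (Nat.pos_of_ne_zero h) (by norm_num)
      conv_lhs => rw [pvDigitLoop, if_neg h]
      conv_rhs => rw [pvDigitLoop, if_neg h]
      rw [ih (n / 10) hlt (s + ((n % 10 : Nat) : Int)),
        ih (n / 10) hlt ((0 : Int) + ((n % 10 : Nat) : Int))]
      ring

-- folding A's per-character digit sum over Nat.toDigitsCore equals B's arithmetic digit loop
theorem pv_toDigitsCore_fold :
    ∀ (fuel m : Nat) (acc : List Char) (s0 : Int), m < fuel →
      List.foldl (fun s d => s + (PySem.Int.ofChars? [d]).getD 0) s0 (Nat.toDigitsCore 10 fuel m acc)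
      = List.foldl (fun s d => s + (PySem.Int.ofChars? [d]).getD 0) (s0 + pvDigitLoop m 0) acc := by
  intro fuel
  induction fuel with
  | zero => intro m acc s0 h; omega
  | succ fuel ih =>
    intro m acc s0 _
    rw [Nat.toDigitsCore]
    by_cases h0 : m / 10 = 0
    · rw [if_pos h0]
      have hm10 : m < 10 := by omega
      simp only [List.foldl_cons]
      rw [pv_digit_val (m % 10) (Nat.mod_lt _ (by norm_num))]
      congr 1
      rw [pvDigitLoop]
      by_cases hz : m = 0
      · subst hz; simp [pvDigitLoop]
      · rw [if_neg hz, h0, pvDigitLoop]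
        simp [Nat.mod_eq_of_lt hm10]
    · rw [if_neg h0]
      have hlt : m / 10 < fuel := by
        have := Nat.div_lt_self (Nat.pos_of_ne_zero (by omega : m ≠ 0)) (by norm_num : 1 < 10)
        omega
      rw [ih (m / 10) _ s0 hlt]
      simp only [List.foldl_cons]
      rw [pv_digit_val (m % 10) (Nat.mod_lt _ (by omega))]
      congr 1
      have : pvDigitLoop m 0 = pvDigitLoop (m / 10) ((m % 10 : Nat) : Int) := by
        rw [pvDigitLoop, if_neg (by omega : ¬ m = 0)]
        norm_num
      rw [this, pvDigitLoop_acc (m / 10) (((m % 10 : Nat) : Int))]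
      ring

-- A's string digit sum equals B's arithmetic digit sum for a nonnegative term
theorem pv_digitsum_eq (t : Int) (ht : 0 ≤ t) :
    (PySem.Int.toChars t).foldl (fun s d => s + (PySem.Int.ofChars? [d]).getD 0) 0
    = (if 0 < t then pvDigitLoop t.toNat 0 else 0) := by
  by_cases hz : t = 0
  · subst hz; decide
  · have hpos : 0 < t := lt_of_le_of_ne ht (Ne.symm hz)
    rw [if_pos hpos]
    have hneg : ¬ t < 0 := by omega
    show (if t < 0 then '-' :: Nat.toDigits 10 t.natAbs else Nat.toDigits 10 t.toNat).foldl _ 0 = _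
    rw [if_neg hneg]
    unfold Nat.toDigits
    rw [pv_toDigitsCore_fold (t.toNat + 1) t.toNat [] 0 (by omega)]
    simp

-- ===== VERDICT (by name: the statement is the Claim_ definition above) =====
theorem sum_dig_nth_term_spec : Claim_equal_sum_dig_nth_term := by
  intro init_val pattern_l nth_term _ hpre
  unfold Spec_sum_dig_nth_term sum_dig_nth_term sum_dig_nth_term_alt
  simp only
  rw [pv_term_eq init_val pattern_l nth_term hpre.1]
  apply pv_digitsum_eq
  obtain ⟨h1, h2⟩ := hpre
  unfold pvTerm_sum_dig_nth_term at h2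
  by_cases hle : nth_term ≤ 1
  · rw [if_neg (by omega)]
    rwa [if_neg (by intro hc; omega)] at h2
  · have hne : pattern_l ≠ [] := h1.resolve_left hle
    rw [if_pos (by omega)]
    rw [if_pos ⟨by omega, hne⟩] at h2
    have hm : PySem.Int.mod (nth_term - 1) (pattern_l.length : Int)
        = ((PySem.Int.mod (nth_term - 1) (pattern_l.length : Int)).toNat : Int) := by
      have := PySem.Int.mod_nonneg (a := nth_term - 1) (b := (pattern_l.length : Int))
        (by exact_mod_cast List.length_pos_iff.mpr hne)
      omega
    rw [hm, PySem.List.slice_to_natCast]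
    exact h2
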